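-- pv_equiv track=rewrite | github.com/izunori/algo_for_competition | algo_fast_moebius.py | fastMoebiusOnSet
-- ===== SOURCE A (Python) =====
-- def fastMoebiusOnSet(A):
--     N = len(A)
--     S = [0]*2**N
--     for i in range(N):
--         S[1<<i] = A[i]
--     for i in range(N):
--         k = 1<<i
--         for j in range(2**N):
--             if not k & j:
--                 S[k|j] += S[j]
--     return S
-- ===== SOURCE B (Python) =====
-- def fastMoebiusOnSet(A):
--     # Doubling DP: each element doubles the table; S[m] = sum of A[i] over bits i of m.
--     S = [0]
--     for a in A:
--         S = S + [s + a for s in S]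
--     return S
-- ===== Notes on version B (the rewrite author's own statement) =====
-- stated objective: faster
-- what changed: Replaces the O(N*2^N) seeded subset-sum zeta transform (triple loop with bit masks over a preallocated table) by a doubling DP that builds the table directly: for each element the table is its old copy followed by the old copy shifted by that element, O(2^N) total work with no bit operations.
import Mathlib
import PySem

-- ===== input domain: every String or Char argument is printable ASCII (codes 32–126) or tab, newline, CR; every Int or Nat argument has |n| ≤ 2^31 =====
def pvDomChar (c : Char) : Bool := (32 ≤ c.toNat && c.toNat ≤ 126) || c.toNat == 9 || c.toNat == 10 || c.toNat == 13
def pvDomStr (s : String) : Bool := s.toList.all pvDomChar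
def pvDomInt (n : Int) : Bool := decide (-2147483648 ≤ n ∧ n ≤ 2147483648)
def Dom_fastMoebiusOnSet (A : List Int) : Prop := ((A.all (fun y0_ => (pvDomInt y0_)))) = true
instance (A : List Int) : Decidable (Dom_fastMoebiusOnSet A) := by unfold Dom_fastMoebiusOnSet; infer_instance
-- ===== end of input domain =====

-- B replaces A's O(N*2^N) bit-masked subset-sum zeta transform by an O(2^N) doubling DP.

-- ===== PORT A =====
-- literal transliteration of A: seed a table of size 2^N at the singleton masks, then the
-- subset-sum zeta transform: for each bit i, for each j with bit i clear, S[2^i|j] += S[j].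
def fastMoebiusOnSet (A : List Int) : List Int :=
  let N := A.length
  let S0 := List.replicate (2 ^ N) (0 : Int)
  let S1 := (List.range N).foldl (fun S i => S.set (2 ^ i) (A.getD i 0)) S0
  (List.range N).foldl (fun S i =>
    let k := 2 ^ i
    (List.range (2 ^ N)).foldl
      (fun S j => if k &&& j == 0 then S.set (k ||| j) (S.getD (k ||| j) 0 + S.getD j 0) else S)
      S) S1

-- ===== PORT B =====
-- transliteration of Source B: S = [0]; for a in A: S = S + [s + a for s in S]; return S
def fastMoebiusOnSet_alt (A : List Int) : List Int :=
  A.foldl (fun S a => S ++ S.map (fun s => s + a)) [0]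

-- ===== PRECONDITION & SPEC =====
def Spec_fastMoebiusOnSet (A : List Int) (out : List Int) : Prop := out = fastMoebiusOnSet_alt A
instance (A : List Int) (out : List Int) : Decidable (Spec_fastMoebiusOnSet A out) := by unfold Spec_fastMoebiusOnSet; infer_instance

-- ===== CLAIM (what is proved, stated in full; the proofs are below) =====
def Claim_equal_fastMoebiusOnSet : Prop := ∀ (A : List Int), Dom_fastMoebiusOnSet A → Spec_fastMoebiusOnSet A (fastMoebiusOnSet A)

-- ===== LEMMAS AND PROOFS =====

-- lowSum A m = sum of A[b] over the set bits b of m (bit 0 ↔ head of A): the common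
-- characterisation both ports are proved equal to.
def lowSum : List Int → Nat → Int
  | [], _ => 0
  | a :: as, m => (if m % 2 = 1 then a else 0) + lowSum as (m / 2)

lemma lowSum_zero (A : List Int) : lowSum A 0 = 0 := by
  induction A with
  | nil => rfl
  | cons a as ih => simp [lowSum, ih]

lemma lowSum_add_pow (A : List Int) : ∀ (i m : Nat), m < 2 ^ i →
    lowSum A (m + 2 ^ i) = A.getD i 0 + lowSum A m := by
  induction A with
  | nil => intro i m _; simp [lowSum]
  | cons a as ih =>
    intro i m hm
    cases i with
    | zero =>
      interval_cases m
      simp [lowSum, lowSum_zero]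
    | succ i =>
      have h2 : (2 : Nat) ^ (i + 1) = 2 * 2 ^ i := by ring
      have hmod : (m + 2 ^ (i + 1)) % 2 = m % 2 := by omega
      have hdiv : (m + 2 ^ (i + 1)) / 2 = m / 2 + 2 ^ i := by omega
      have hm2 : m / 2 < 2 ^ i := by omega
      simp only [lowSum, hmod, hdiv, List.getD_cons_succ, ih i (m / 2) hm2]
      ring

-- ---------- the B side equals the map of lowSum over range (2^N) ----------

lemma range_two_mul_flatMap {α : Type} (n : Nat) (f : Nat → List α) :
    (List.range (2 * n)).flatMap f
      = (List.range n).flatMap (fun q => f (2 * q) ++ f (2 * q + 1)) := by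
  induction n with
  | zero => simp
  | succ n ih =>
    have h : 2 * (n + 1) = (2 * n + 1) + 1 := by ring
    rw [h, List.range_succ, List.range_succ, List.range_succ,
        List.flatMap_append, List.flatMap_append, ih, List.flatMap_append]
    simp

lemma alt_fold (as : List Int) : ∀ (S : List Int),
    as.foldl (fun S a => S ++ S.map (fun s => s + a)) S
      = (List.range (2 ^ as.length)).flatMap (fun q => S.map (fun s => s + lowSum as q)) := by
  induction as with
  | nil =>
    intro S
    simp [lowSum]
  | cons a as ih =>
    intro S
    rw [List.foldl_cons, ih]
    have h2 : (2 : Nat) ^ (a :: as).length = 2 * 2 ^ as.length := by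
      simp [List.length_cons]
      ring
    rw [h2, range_two_mul_flatMap]
    refine List.flatMap_congr ?_
    intro q hq
    have hL : lowSum (a :: as) (2 * q) = lowSum as q := by
      have h3 : (2 * q) % 2 = 0 := by omega
      have h4 : (2 * q) / 2 = q := by omega
      simp [lowSum, h3, h4]
    have hR : lowSum (a :: as) (2 * q + 1) = a + lowSum as q := by
      have h3 : (2 * q + 1) % 2 = 1 := by omega
      have h4 : (2 * q + 1) / 2 = q := by omega
      simp [lowSum, h3, h4]
    simp only [List.map_append, List.map_map, hL, hR]
    congr 1
    refine List.map_congr_left ?_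
    intro s _
    simp
    ring

lemma alt_eq_map (A : List Int) :
    fastMoebiusOnSet_alt A = (List.range (2 ^ A.length)).map (lowSum A) := by
  rw [fastMoebiusOnSet_alt, alt_fold]
  simp only [List.map_cons, List.map_nil, Int.zero_add]
  rw [List.map_eq_flatMap]

-- ---------- the A side ----------

-- the inner-loop body and the seeding fold, named for the proofs
def stepA (i : Nat) (S : List Int) (j : Nat) : List Int :=
  if 2 ^ i &&& j == 0 then S.set (2 ^ i ||| j) (S.getD (2 ^ i ||| j) 0 + S.getD j 0) else S

def seedA (A : List Int) : List Int :=
  (List.range A.length).foldl (fun S i => S.set (2 ^ i) (A.getD i 0))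
    (List.replicate (2 ^ A.length) 0)

lemma portA_eq (A : List Int) :
    fastMoebiusOnSet A
      = (List.range A.length).foldl
          (fun S i => (List.range (2 ^ A.length)).foldl (stepA i) S) (seedA A) := rfl

lemma getD_set' (S : List Int) (n m : Nat) (a : Int) :
    (S.set n a).getD m 0 = if n = m ∧ n < S.length then a else S.getD m 0 := by
  simp only [List.getD_eq_getElem?_getD, List.getElem?_set]
  by_cases h1 : n = m
  · subst h1
    by_cases h2 : n < S.length
    · simp [h2]
    · simp [h2]
  · simp [h1]

lemma and_two_pow_zero_iff (i j : Nat) : (2 ^ i &&& j = 0) ↔ j / 2 ^ i % 2 = 0 := by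
  have hp : 0 < 2 ^ i := Nat.two_pow_pos i
  have ht : j.testBit i = decide (j / 2 ^ i % 2 = 1) := Nat.testBit_eq_decide_div_mod_eq
  rw [Nat.two_pow_and]
  rcases h : j.testBit i with _ | _ <;> rw [h] at ht <;> simp_all

lemma or_two_pow_eq_add (i j : Nat) (h : j / 2 ^ i % 2 = 0) : 2 ^ i ||| j = j + 2 ^ i := by
  have hp : 0 < 2 ^ i := Nat.two_pow_pos i
  have hmm : j % (2 ^ i * 2) = j % 2 ^ i := by
    rw [Nat.mod_mul, h]; omega
  have hl : j % (2 ^ i * 2) < 2 ^ i := by rw [hmm]; exact Nat.mod_lt _ hp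
  have hpow : (2 : Nat) ^ (i + 1) = 2 ^ i * 2 := by ring
  have e0 : 2 ^ i * 2 * (j / (2 ^ i * 2)) + j % (2 ^ i * 2) = j := Nat.div_add_mod j _
  have a1 : 2 ^ (i + 1) * (j / (2 ^ i * 2)) + (2 ^ i + j % (2 ^ i * 2))
      = 2 ^ (i + 1) * (j / (2 ^ i * 2)) ||| (2 ^ i + j % (2 ^ i * 2)) :=
    Nat.two_pow_add_eq_or_of_lt (by rw [hpow]; omega) _
  have a2 : 2 ^ i * 1 + j % (2 ^ i * 2) = 2 ^ i * 1 ||| j % (2 ^ i * 2) :=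
    Nat.two_pow_add_eq_or_of_lt hl _
  have a3 : 2 ^ (i + 1) * (j / (2 ^ i * 2)) + j % (2 ^ i * 2)
      = 2 ^ (i + 1) * (j / (2 ^ i * 2)) ||| j % (2 ^ i * 2) :=
    Nat.two_pow_add_eq_or_of_lt (by rw [hpow]; omega) _
  rw [hpow] at a1 a3
  rw [Nat.mul_one] at a2
  calc 2 ^ i ||| j
      = 2 ^ i ||| (2 ^ i * 2 * (j / (2 ^ i * 2)) ||| j % (2 ^ i * 2)) := by rw [← a3, e0]
    _ = (2 ^ i ||| 2 ^ i * 2 * (j / (2 ^ i * 2))) ||| j % (2 ^ i * 2) := by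
        rw [Nat.or_assoc]
    _ = (2 ^ i * 2 * (j / (2 ^ i * 2)) ||| 2 ^ i) ||| j % (2 ^ i * 2) := by
        rw [Nat.or_comm (2 ^ i)]
    _ = 2 ^ i * 2 * (j / (2 ^ i * 2)) ||| (2 ^ i ||| j % (2 ^ i * 2)) := by
        rw [Nat.or_assoc]
    _ = 2 ^ i * 2 * (j / (2 ^ i * 2)) ||| (2 ^ i + j % (2 ^ i * 2)) := by rw [← a2]
    _ = 2 ^ i * 2 * (j / (2 ^ i * 2)) + (2 ^ i + j % (2 ^ i * 2)) := by rw [← a1]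
    _ = j + 2 ^ i := by omega

lemma lt_of_bit_clear (i N j : Nat) (hiN : i < N) (hj : j < 2 ^ N) (hb : j / 2 ^ i % 2 = 0) :
    j + 2 ^ i < 2 ^ N := by
  have hp : 0 < 2 ^ i := Nat.two_pow_pos i
  have hr : j % (2 ^ i * 2) < 2 ^ i := by
    rw [Nat.mod_mul, hb]; omega
  have hQ : 2 ^ i * 2 * 2 ^ (N - i - 1) = 2 ^ N := by
    rw [← Nat.pow_succ, ← Nat.pow_add]
    congr 1
    omega
  have e0 : 2 ^ i * 2 * (j / (2 ^ i * 2)) + j % (2 ^ i * 2) = j := Nat.div_add_mod j _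
  have hd : j / (2 ^ i * 2) < 2 ^ (N - i - 1) := by
    apply Nat.div_lt_of_lt_mul
    rw [hQ]
    exact hj
  have h3 : 2 ^ i * 2 * (j / (2 ^ i * 2) + 1) ≤ 2 ^ i * 2 * 2 ^ (N - i - 1) :=
    Nat.mul_le_mul_left _ (by omega)
  have h4 : 2 ^ i * 2 * (j / (2 ^ i * 2) + 1) = 2 ^ i * 2 * (j / (2 ^ i * 2)) + 2 ^ i * 2 := by
    ring
  omega

lemma add_pow_div (i t : Nat) : (t + 2 ^ i) / 2 ^ i = t / 2 ^ i + 1 :=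
  Nat.add_div_right _ (Nat.two_pow_pos i)

-- inner loop: for each j with bit i clear, S[j + 2^i] += S[j]; the invariant after the
-- first t iterations
lemma inner_inv (i N : Nat) (hiN : i < N) (S : List Int) (hlen : S.length = 2 ^ N) :
    ∀ t, t ≤ 2 ^ N →
      ((List.range t).foldl (stepA i) S).length = 2 ^ N ∧
      ∀ m, ((List.range t).foldl (stepA i) S).getD m 0
          = S.getD m 0 + (if m / 2 ^ i % 2 = 1 ∧ m - 2 ^ i < t then S.getD (m - 2 ^ i) 0 else 0) := by
  have hp : 0 < 2 ^ i := Nat.two_pow_pos i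
  intro t
  induction t with
  | zero =>
    intro _
    refine ⟨by simpa using hlen, fun m => ?_⟩
    simp
  | succ t ih =>
    intro ht
    obtain ⟨hTlen, hTget⟩ := ih (by omega)
    rw [List.range_succ, List.foldl_append, List.foldl_cons, List.foldl_nil]
    set T := (List.range t).foldl (stepA i) S with hT
    by_cases hc : t / 2 ^ i % 2 = 0
    · have hcond : (2 ^ i &&& t == 0) = true := by
        rw [beq_iff_eq]; exact (and_two_pow_zero_iff i t).mpr hc
      have hor : 2 ^ i ||| t = t + 2 ^ i := or_two_pow_eq_add i t hc
      have hlt : t + 2 ^ i < 2 ^ N := lt_of_bit_clear i N t hiN (by omega) hc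
      rw [stepA, hcond, if_pos rfl, hor]
      constructor
      · rw [List.length_set]; exact hTlen
      · intro m
        rw [getD_set']
        by_cases hm : t + 2 ^ i = m
        · subst hm
          rw [if_pos ⟨rfl, by omega⟩]
          have hb1 : (t + 2 ^ i) / 2 ^ i % 2 = 1 := by rw [add_pow_div]; omega
          have e1 : T.getD (t + 2 ^ i) 0 = S.getD (t + 2 ^ i) 0 := by
            rw [hTget, if_neg]
            · ring
            · rintro ⟨_, hlt2⟩; omega
          have e2 : T.getD t 0 = S.getD t 0 := by
            rw [hTget, if_neg]
            · ring
            · rintro ⟨h1, _⟩; omega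
          rw [e1, e2, if_pos ⟨hb1, by omega⟩]
          have he : t + 2 ^ i - 2 ^ i = t := by omega
          rw [he]
        · rw [if_neg (by tauto), hTget]
          congr 1
          by_cases hb : m / 2 ^ i % 2 = 1
          · have hge : 2 ^ i ≤ m := by
              by_contra hx
              rw [Nat.div_eq_of_lt (by omega)] at hb
              omega
            have hne : m - 2 ^ i ≠ t := by omega
            by_cases h5 : m - 2 ^ i < t
            · rw [if_pos ⟨hb, h5⟩, if_pos ⟨hb, by omega⟩]
            · rw [if_neg (by tauto), if_neg (by rintro ⟨_, h6⟩; omega)]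
          · rw [if_neg (by tauto), if_neg (by tauto)]
    · have hcond : (2 ^ i &&& t == 0) = false := by
        rw [beq_eq_false_iff_ne]
        intro hx
        exact hc ((and_two_pow_zero_iff i t).mp hx)
      rw [stepA, hcond]
      simp only [Bool.false_eq_true, if_false]
      refine ⟨hTlen, fun m => ?_⟩
      rw [hTget]
      congr 1
      by_cases hb : m / 2 ^ i % 2 = 1
      · have hge : 2 ^ i ≤ m := by
          by_contra hx
          rw [Nat.div_eq_of_lt (by omega)] at hb
          omega
        have hne : m - 2 ^ i ≠ t := by
          intro hx
          have hme : m = t + 2 ^ i := by omega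
          subst hme
          rw [add_pow_div] at hb
          omega
        by_cases h5 : m - 2 ^ i < t
        · rw [if_pos ⟨hb, h5⟩, if_pos ⟨hb, by omega⟩]
        · rw [if_neg (by tauto), if_neg (by rintro ⟨_, h6⟩; omega)]
      · rw [if_neg (by tauto), if_neg (by tauto)]

-- characterisation of the seeding fold
lemma seed_fold_len (A : List Int) : ∀ (n : Nat) (S : List Int),
    ((List.range n).foldl (fun S i => S.set (2 ^ i) (A.getD i 0)) S).length = S.length := by
  intro n
  induction n with
  | zero => intro S; rfl
  | succ n ih =>
    intro S
    rw [List.range_succ, List.foldl_append, List.foldl_cons, List.foldl_nil,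
        List.length_set, ih]

lemma pow_inj_two (a b : Nat) (h : (2 : Nat) ^ a = 2 ^ b) : a = b :=
  Nat.pow_right_injective (by norm_num) h

lemma seed_fold_pow (A : List Int) : ∀ (n : Nat) (S : List Int) (i : Nat), i < n → 2 ^ i < S.length →
    (((List.range n).foldl (fun S i => S.set (2 ^ i) (A.getD i 0)) S).getD (2 ^ i) 0)
      = A.getD i 0 := by
  intro n
  induction n with
  | zero => intro S i hi; omega
  | succ n ih =>
    intro S i hi hlt
    rw [List.range_succ, List.foldl_append, List.foldl_cons, List.foldl_nil, getD_set']
    by_cases he : i = n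
    · subst he
      rw [if_pos ⟨rfl, by rw [seed_fold_len]; exact hlt⟩]
    · rw [if_neg]
      · exact ih S i (by omega) hlt
      · rintro ⟨h1, _⟩
        exact he (pow_inj_two n i h1).symm

lemma seed_fold_other (A : List Int) : ∀ (n : Nat) (S : List Int) (x : Nat),
    (∀ i, i < n → x ≠ 2 ^ i) →
    (((List.range n).foldl (fun S i => S.set (2 ^ i) (A.getD i 0)) S).getD x 0) = S.getD x 0 := by
  intro n
  induction n with
  | zero => intro S x _; rfl
  | succ n ih =>
    intro S x hx
    rw [List.range_succ, List.foldl_append, List.foldl_cons, List.foldl_nil, getD_set',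
        if_neg, ih S x (fun i hi => hx i (by omega))]
    rintro ⟨h1, _⟩
    exact hx n (by omega) h1.symm

lemma seedA_len (A : List Int) : (seedA A).length = 2 ^ A.length := by
  rw [seedA, seed_fold_len, List.length_replicate]

lemma seedA_pow (A : List Int) (i : Nat) (hi : i < A.length) :
    (seedA A).getD (2 ^ i) 0 = A.getD i 0 := by
  refine seed_fold_pow A _ _ i hi ?_
  rw [List.length_replicate]
  exact Nat.pow_lt_pow_right (by norm_num) hi

lemma seedA_other (A : List Int) (x : Nat) (hx : ∀ i, i < A.length → x ≠ 2 ^ i) :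
    (seedA A).getD x 0 = 0 := by
  rw [seedA, seed_fold_other A _ _ x hx]
  simp [List.getD_eq_getElem?_getD]

lemma odd_mul_pow_ne_pow (q i j : Nat) (hq : q % 2 = 1) (hq3 : 3 ≤ q) : q * 2 ^ i ≠ 2 ^ j := by
  intro h
  by_cases hji : j ≤ i
  · have h1 : (2 : Nat) ^ j ≤ 2 ^ i := Nat.pow_le_pow_right (by norm_num) hji
    have h2 : 2 ^ i ≤ q * 2 ^ i := Nat.le_mul_of_pos_left _ (by omega)
    have hp : 0 < (2 : Nat) ^ i := Nat.two_pow_pos i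
    nlinarith
  · have hij : i < j := by omega
    have h2 : (2 : Nat) ^ j = 2 ^ (j - i) * 2 ^ i := by
      rw [← Nat.pow_add]; congr 1; omega
    rw [h2] at h
    have h3 : q = 2 ^ (j - i) := Nat.eq_of_mul_eq_mul_right (Nat.two_pow_pos i) h
    have h4 : (2 : Nat) ^ (j - i) = 2 * 2 ^ (j - i - 1) := by
      rw [← Nat.pow_succ']
      congr 1
      omega
    omega

-- outer loop: after the passes for bits 0..i-1, entry m (m < 2^N) holds the low-bit
-- subset sum if m < 2^i, and otherwise the seed value at m with its low i bits cleared
lemma outer_inv (A : List Int) : ∀ i, i ≤ A.length →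
    (((List.range i).foldl
        (fun S i' => (List.range (2 ^ A.length)).foldl (stepA i') S) (seedA A)).length
      = 2 ^ A.length) ∧
    ∀ m, m < 2 ^ A.length →
      ((List.range i).foldl
          (fun S i' => (List.range (2 ^ A.length)).foldl (stepA i') S) (seedA A)).getD m 0
        = if m / 2 ^ i = 0 then lowSum A m else (seedA A).getD (m / 2 ^ i * 2 ^ i) 0 := by
  intro i
  induction i with
  | zero =>
    intro _
    refine ⟨seedA_len A, fun m _ => ?_⟩
    simp only [List.range_zero, List.foldl_nil, pow_zero, Nat.div_one, Nat.mul_one]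
    by_cases hm : m = 0
    · subst hm
      rw [if_pos rfl, lowSum_zero]
      exact seedA_other A 0 (fun i _ => by have := Nat.two_pow_pos i; omega)
    · rw [if_neg hm]
  | succ i ih =>
    intro hi
    obtain ⟨hTlen, hTget⟩ := ih (by omega)
    rw [List.range_succ, List.foldl_append, List.foldl_cons, List.foldl_nil]
    set T := (List.range i).foldl
        (fun S i' => (List.range (2 ^ A.length)).foldl (stepA i') S) (seedA A) with hT
    obtain ⟨hIlen, hIget⟩ := inner_inv i A.length (by omega) T hTlen (2 ^ A.length) le_rfl
    refine ⟨hIlen, fun m hm => ?_⟩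
    have hp : 0 < 2 ^ i := Nat.two_pow_pos i
    have hdd : m / 2 ^ (i + 1) = m / 2 ^ i / 2 := by
      rw [Nat.pow_succ, ← Nat.div_div_eq_div_mul]
    have e0 : 2 ^ i * (m / 2 ^ i) + m % 2 ^ i = m := Nat.div_add_mod m (2 ^ i)
    have hmod : m % 2 ^ i < 2 ^ i := Nat.mod_lt _ hp
    have hdm := Nat.div_add_mod (m / 2 ^ i) 2
    rw [hIget m]
    by_cases hb : m / 2 ^ i % 2 = 1
    · have hge : 2 ^ i ≤ m := by
        by_contra hx
        rw [Nat.div_eq_of_lt (by omega)] at hb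
        omega
      have hsub : (m - 2 ^ i) / 2 ^ i = m / 2 ^ i - 1 := by
        simpa using Nat.sub_mul_div m (2 ^ i) 1
      rw [if_pos ⟨hb, by omega⟩]
      by_cases hq1 : m / 2 ^ i = 1
      · have hqd : m / 2 ^ (i + 1) = 0 := by rw [hdd, hq1]
        have hTm : T.getD m 0 = A.getD i 0 := by
          rw [hTget m hm, if_neg (by omega), hq1, Nat.one_mul]
          exact seedA_pow A i (by omega)
        have hTm' : T.getD (m - 2 ^ i) 0 = lowSum A (m - 2 ^ i) := by
          rw [hTget (m - 2 ^ i) (by omega), if_pos (by rw [hsub, hq1])]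
        rw [hTm, hTm', hqd, if_pos rfl]
        have hlow : m - 2 ^ i < 2 ^ i := by
          have e0' := e0
          rw [hq1, Nat.mul_one] at e0'
          omega
        have hsum := lowSum_add_pow A i (m - 2 ^ i) hlow
        have hmm : m - 2 ^ i + 2 ^ i = m := by omega
        rw [hmm] at hsum
        rw [hsum]
      · have hq3 : 3 ≤ m / 2 ^ i := by omega
        have hTm : T.getD m 0 = 0 := by
          rw [hTget m hm, if_neg (by omega)]
          exact seedA_other A _ (fun j _ => odd_mul_pow_ne_pow _ i j hb hq3)
        have hTm' : T.getD (m - 2 ^ i) 0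
            = (seedA A).getD ((m / 2 ^ i - 1) * 2 ^ i) 0 := by
          rw [hTget (m - 2 ^ i) (by omega), hsub, if_neg (by omega)]
        have hne : m / 2 ^ (i + 1) ≠ 0 := by rw [hdd]; omega
        rw [hTm, hTm', if_neg hne, Int.zero_add]
        have h2 : m / 2 ^ i - 1 = 2 * (m / 2 ^ i / 2) := by omega
        have harg : (m / 2 ^ i - 1) * 2 ^ i = m / 2 ^ (i + 1) * 2 ^ (i + 1) := by
          rw [hdd, h2, Nat.pow_succ]
          ring
        rw [harg]
    · have hb0 : m / 2 ^ i % 2 = 0 := by omega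
      rw [if_neg (by tauto), Int.add_zero]
      by_cases hq0 : m / 2 ^ i = 0
      · have hqd : m / 2 ^ (i + 1) = 0 := by rw [hdd, hq0]
        rw [hTget m hm, if_pos hq0, hqd, if_pos rfl]
      · have hq2 : 2 ≤ m / 2 ^ i := by omega
        have hqd : m / 2 ^ (i + 1) ≠ 0 := by rw [hdd]; omega
        rw [hTget m hm, if_neg hq0, if_neg hqd]
        have h2 : m / 2 ^ i = 2 * (m / 2 ^ i / 2) := by omega
        have harg : m / 2 ^ i * 2 ^ i = m / 2 ^ (i + 1) * 2 ^ (i + 1) := by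
          rw [hdd, Nat.pow_succ]
          calc m / 2 ^ i * 2 ^ i = 2 * (m / 2 ^ i / 2) * 2 ^ i := by rw [← h2]
            _ = m / 2 ^ i / 2 * (2 ^ i * 2) := by ring
        rw [harg]

lemma portA_eq_map (A : List Int) :
    fastMoebiusOnSet A = (List.range (2 ^ A.length)).map (lowSum A) := by
  rw [portA_eq]
  obtain ⟨hlen, hget⟩ := outer_inv A A.length le_rfl
  apply List.ext_getElem
  · rw [hlen, List.length_map, List.length_range]
  · intro n h1 h2
    have hn : n < 2 ^ A.length := by rwa [hlen] at h1
    have hd : ((List.range A.length).foldl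
        (fun S i' => (List.range (2 ^ A.length)).foldl (stepA i') S) (seedA A))[n]
        = ((List.range A.length).foldl
        (fun S i' => (List.range (2 ^ A.length)).foldl (stepA i') S) (seedA A)).getD n 0 :=
      (List.getD_eq_getElem _ _ h1).symm
    rw [hd, hget n hn, if_pos (Nat.div_eq_of_lt hn)]
    simp

-- ===== VERDICT (by name: the statement is the Claim_ definition above) =====
theorem fastMoebiusOnSet_spec : Claim_equal_fastMoebiusOnSet := by
  intro A _
  unfold Spec_fastMoebiusOnSet
  rw [alt_eq_map, portA_eq_map]
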